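-- pv_equiv track=rewrite | github.com/drmobile11/g4f-api | main.py | parse_working_models
-- ===== SOURCE A (Python) =====
-- from typing import Dict, List, Optional, Union, AsyncGenerator, Any
--
-- def parse_working_models(lines: List[str]) -> Dict[str, List[tuple]]:
--     """Parse working models and build PROVIDER_MODEL_MAP"""
--     PROVIDER_MODEL_MAP = {}
--     excluded_providers = {"HuggingSpace", "PerplexityLabs"}
--
--     # Parse each line
--     for line in lines:
--         if not line.strip():
--             continue
--
--         parts = line.strip().split('|')
--         if len(parts) >= 3:
--             provider, model_id, modality = parts[0], parts[1], parts[2]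
--
--             # Skip excluded providers
--             if provider in excluded_providers:
--                 continue
--
--             # Add to PROVIDER_MODEL_MAP
--             if model_id not in PROVIDER_MODEL_MAP:
--                 PROVIDER_MODEL_MAP[model_id] = []
--
--             # Avoid duplicates
--             if (provider, model_id) not in PROVIDER_MODEL_MAP[model_id]:
--                 PROVIDER_MODEL_MAP[model_id].append((provider, model_id))
--
--     # Add default fallback
--     PROVIDER_MODEL_MAP["default"] = [("AnyProvider", "default"), ("PollinationsAI", "openai")]
--
--     return PROVIDER_MODEL_MAP
-- ===== SOURCE B (Python) =====
-- def parse_working_models(lines):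
--     """Parse lines into flat (provider, model) records, then group per model by
--     repeated filtered scans over the record list (no dict during parsing)."""
--     excluded = {"HuggingSpace", "PerplexityLabs"}
--     records = [(parts[0], parts[1])
--                for parts in (line.strip().split('|') for line in lines)
--                if len(parts) >= 3 and parts[0] not in excluded]
--     models = []
--     for _, m in records:
--         if m not in models:
--             models.append(m)
--     result = {}
--     for m in models:
--         pairs = []
--         for p, mm in records:
--             if mm == m and (p, m) not in pairs:
--                 pairs.append((p, m))
--         result[m] = pairs
--     return {**result, "default": [("AnyProvider", "default"), ("PollinationsAI", "openai")]}
-- ===== Notes on version B (the rewrite author's own statement) =====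
-- stated objective: alternative
-- what changed: A's single pass that grows a dict with inline create-and-dedup per line is replaced by parse-to-flat-records followed by grouping via repeated filtered scans of the record list (first-appearance model order, per-model provider dedup by scan), with 'default' merged in last; no dict is used during parsing.
import Mathlib
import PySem

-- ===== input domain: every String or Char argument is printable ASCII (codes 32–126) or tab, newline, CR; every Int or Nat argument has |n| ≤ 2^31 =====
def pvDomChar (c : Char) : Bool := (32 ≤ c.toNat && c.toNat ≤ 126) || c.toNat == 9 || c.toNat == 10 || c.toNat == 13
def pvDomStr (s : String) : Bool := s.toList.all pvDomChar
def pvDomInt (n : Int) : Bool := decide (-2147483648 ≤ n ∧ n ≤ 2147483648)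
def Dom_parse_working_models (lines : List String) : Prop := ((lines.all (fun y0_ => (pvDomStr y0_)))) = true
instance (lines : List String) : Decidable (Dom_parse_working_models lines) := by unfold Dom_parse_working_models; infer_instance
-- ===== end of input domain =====

-- B replaces A's single-pass dict-with-inline-dedup by parse-to-flat-records followed by
-- grouping via repeated filtered scans of the record list; same results, not faster.

-- ===== PORT A =====
-- A's loop body: skip blank lines / short lines / excluded providers, else create-and-append
-- with an inline duplicate check.  line.strip().split('|') is (PySem.Str.split? · "|").getD []
-- (exact: split? is none only for an empty separator).
def pwmStepA (d : PySem.Dict String (List (String × String))) (line : String) :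
    PySem.Dict String (List (String × String)) :=
  if PySem.Str.strip line = "" then d
  else
    let parts := (PySem.Str.split? (PySem.Str.strip line) "|").getD []
    if 3 ≤ parts.length then
      let provider := PySem.List.pyGetD parts 0 ""
      let model_id := PySem.List.pyGetD parts 1 ""
      if provider ∈ PySem.Set.ofList ["HuggingSpace", "PerplexityLabs"] then d
      else
        let d1 := if d.contains model_id then d else d.insert model_id ([] : List (String × String))
        let cur := d1.getD model_id []
        if (provider, model_id) ∈ cur then d1 else d1.insert model_id (cur ++ [(provider, model_id)])
    else d

def parse_working_models (lines : List String) : List (String × List (String × String)) :=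
  ((lines.foldl pwmStepA PySem.Dict.empty).insert "default"
    [("AnyProvider", "default"), ("PollinationsAI", "openai")]).items

-- ===== PORT B =====
-- B's record comprehension: one line to at most one (provider, model_id) record
-- (a blank line strips to "" and "".split('|') is [""], too short, so no record).
def pwmRecord (line : String) : Option (String × String) :=
  let parts := (PySem.Str.split? (PySem.Str.strip line) "|").getD []
  if 3 ≤ parts.length ∧
      PySem.List.pyGetD parts 0 "" ∉ PySem.Set.ofList ["HuggingSpace", "PerplexityLabs"] then
    some (PySem.List.pyGetD parts 0 "", PySem.List.pyGetD parts 1 "")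
  else none

-- B's models loop: distinct model ids, first-appearance order.
def pwmModels (records : List (String × String)) : List String :=
  records.foldl (fun ms r => if r.2 ∈ ms then ms else ms ++ [r.2]) []

-- B's inner pairs loop for one model: scan all records, keep matches not seen yet.
def pwmPairs (records : List (String × String)) (m : String) : List (String × String) :=
  records.foldl (fun acc r => if r.2 = m ∧ (r.1, m) ∉ acc then acc ++ [(r.1, m)] else acc) []

def parse_working_models_alt (lines : List String) : List (String × List (String × String)) :=
  let records := lines.filterMap pwmRecord
  let models := pwmModels records
  let result := models.foldl (fun d m => d.insert m (pwmPairs records m)) PySem.Dict.empty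
  -- {**result, "default": …} = result with "default" overwritten (position kept if present)
  (result.insert "default" [("AnyProvider", "default"), ("PollinationsAI", "openai")]).items

-- ===== PRECONDITION & SPEC =====
def Spec_parse_working_models (lines : List String) (out : List (String × List (String × String))) : Prop := out = parse_working_models_alt lines
instance (lines : List String) (out : List (String × List (String × String))) : Decidable (Spec_parse_working_models lines out) := by unfold Spec_parse_working_models; infer_instance

-- ===== CLAIM (what is proved, stated in full; the proofs are below) =====
def Claim_equal_parse_working_models : Prop := ∀ (lines : List String), Dom_parse_working_models lines → Spec_parse_working_models lines (parse_working_models lines)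

-- ===== LEMMAS AND PROOFS =====

-- A's step expressed at the record level (proof helper only).
def pwmStepR (d : PySem.Dict String (List (String × String))) (r : String × String) :
    PySem.Dict String (List (String × String)) :=
  let d1 := if d.contains r.2 then d else d.insert r.2 ([] : List (String × String))
  let cur := d1.getD r.2 []
  if (r.1, r.2) ∈ cur then d1 else d1.insert r.2 (cur ++ [(r.1, r.2)])

theorem pwm_stepA_record (d : PySem.Dict String (List (String × String))) (line : String) :
    pwmStepA d line = (pwmRecord line).elim d (pwmStepR d) := by
  unfold pwmStepA pwmRecord
  by_cases h0 : PySem.Str.strip line = ""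
  · have hlen : ¬ 3 ≤ ((PySem.Str.split? "" "|").getD []).length := by decide
    simp [h0, hlen]
  · simp only [h0, if_false]
    set parts := (PySem.Str.split? (PySem.Str.strip line) "|").getD [] with hp
    clear_value parts
    by_cases h1 : 3 ≤ parts.length
    · by_cases h2 : PySem.List.pyGetD parts 0 "" ∈ PySem.Set.ofList ["HuggingSpace", "PerplexityLabs"]
      · simp [h1, h2]
      · simp [h1, h2, pwmStepR]
    · simp [h1]

theorem pwm_fold_record (lines : List String) (d : PySem.Dict String (List (String × String))) :
    lines.foldl pwmStepA d = (lines.filterMap pwmRecord).foldl pwmStepR d := by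
  induction lines generalizing d with
  | nil => rfl
  | cons l t ih =>
      rw [List.foldl_cons, pwm_stepA_record, List.filterMap_cons]
      cases pwmRecord l with
      | none => exact ih d
      | some r => rw [Option.elim, List.foldl_cons]; exact ih _

-- append laws for B's folds
theorem pwm_models_append (rs : List (String × String)) (r : String × String) :
    pwmModels (rs ++ [r])
      = if r.2 ∈ pwmModels rs then pwmModels rs else pwmModels rs ++ [r.2] := by
  simp [pwmModels, List.foldl_append]

theorem pwm_pairs_append (rs : List (String × String)) (r : String × String) (m : String) :
    pwmPairs (rs ++ [r]) m
      = if r.2 = m ∧ (r.1, m) ∉ pwmPairs rs m then pwmPairs rs m ++ [(r.1, m)]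
        else pwmPairs rs m := by
  simp [pwmPairs, List.foldl_append]

theorem pwm_models_nodup_aux (rs : List (String × String)) (ms : List String) (h : ms.Nodup) :
    (rs.foldl (fun ms r => if r.2 ∈ ms then ms else ms ++ [r.2]) ms).Nodup := by
  induction rs generalizing ms with
  | nil => exact h
  | cons r t ih =>
      rw [List.foldl_cons]
      by_cases hm : r.2 ∈ ms
      · rw [if_pos hm]; exact ih ms h
      · rw [if_neg hm]
        refine ih _ ?_
        rw [List.nodup_append]
        refine ⟨h, List.nodup_singleton _, ?_⟩
        intro a ha b hb he
        subst he
        have hb' : a = r.2 := by simpa using hb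
        exact hm (hb' ▸ ha)

theorem pwm_models_nodup (rs : List (String × String)) : (pwmModels rs).Nodup :=
  pwm_models_nodup_aux rs [] List.nodup_nil

theorem pwm_mem_models_aux (rs : List (String × String)) (ms : List String) (a : String) :
    a ∈ rs.foldl (fun ms r => if r.2 ∈ ms then ms else ms ++ [r.2]) ms
      ↔ a ∈ ms ∨ a ∈ rs.map Prod.snd := by
  induction rs generalizing ms with
  | nil => simp
  | cons r t ih =>
      rw [List.foldl_cons]
      by_cases hm : r.2 ∈ ms
      · rw [if_pos hm, ih]
        constructor
        · rintro (h | h)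
          · exact Or.inl h
          · exact Or.inr (by simp [h])
        · rintro (h | h)
          · exact Or.inl h
          · rcases (by simpa using h : a = r.2 ∨ a ∈ t.map Prod.snd) with h | h
            · exact Or.inl (h ▸ hm)
            · exact Or.inr h
      · rw [if_neg hm, ih]
        simp only [List.mem_append, List.map_cons, List.mem_cons]
        tauto

theorem pwm_mem_models (rs : List (String × String)) (a : String) :
    a ∈ pwmModels rs ↔ a ∈ rs.map Prod.snd := by
  rw [pwmModels, pwm_mem_models_aux]; simp

theorem pwm_pairs_nil (rs : List (String × String)) (m : String)
    (h : ∀ r ∈ rs, r.2 ≠ m) : pwmPairs rs m = [] := by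
  induction rs using List.reverseRecOn with
  | nil => rfl
  | append_singleton t r ih =>
      rw [pwm_pairs_append, if_neg]
      · exact ih (fun x hx => h x (by simp [hx]))
      · rintro ⟨h2, -⟩
        exact h r (by simp) h2

-- the main invariant: A's record fold, characterised as B's grouping
theorem pwm_fold_items (rs : List (String × String)) :
    (rs.foldl pwmStepR PySem.Dict.empty).items
      = (pwmModels rs).map (fun m => (m, pwmPairs rs m)) := by
  induction rs using List.reverseRecOn with
  | nil => rfl
  | append_singleton t r ih =>
      obtain ⟨p, m⟩ := r
      rw [List.foldl_append, List.foldl_cons, List.foldl_nil]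
      set D := t.foldl pwmStepR PySem.Dict.empty with hD
      have hkeys : D.keys = pwmModels t := by
        show D.items.map Prod.fst = _
        rw [ih, List.map_map]
        simp [Function.comp_def]
      have hknd : D.keys.Nodup := by rw [hkeys]; exact pwm_models_nodup t
      have hcont : D.contains m = decide (m ∈ pwmModels t) := by
        rw [PySem.Dict.contains_eq_decide_mem_keys, hkeys]
      by_cases hm : m ∈ pwmModels t
      · -- model already present
        have hc : D.contains m = true := by rw [hcont]; simpa using hm
        have hitem : (m, pwmPairs t m) ∈ D.items := by
          rw [ih]; exact List.mem_map.mpr ⟨m, hm, rfl⟩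
        have hgd : D.getD m [] = pwmPairs t m := PySem.Dict.getD_of_mem_items D hitem hknd []
        rw [pwm_models_append, if_pos hm]
        unfold pwmStepR
        simp only [hc, hgd, reduceIte]
        by_cases hmem : (p, m) ∈ pwmPairs t m
        · rw [if_pos hmem, ih]
          apply List.map_congr_left
          intro m' hm'
          rw [pwm_pairs_append]
          by_cases he : m = m'
          · subst he; rw [if_neg]; rintro ⟨-, hnm⟩; exact hnm hmem
          · rw [if_neg]; rintro ⟨h2, -⟩; exact he h2
        · rw [if_neg hmem, PySem.Dict.items_insert, hc]
          simp only [reduceIte]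
          rw [ih, List.map_map]
          apply List.map_congr_left
          intro m' hm'
          simp only [Function.comp]
          rw [pwm_pairs_append]
          by_cases he : m' = m
          · subst he
            simp only [beq_self_eq_true, if_true]
            rw [if_pos ⟨by trivial, hmem⟩]
          · have : (m' == m) = false := by simpa using he
            simp only [this, Bool.false_eq_true, if_false]
            rw [if_neg]; rintro ⟨h2, -⟩; exact he h2.symm
      · -- new model
        have hc : D.contains m = false := by rw [hcont]; simpa using hm
        have hnorec : ∀ x ∈ t, x.2 ≠ m := by
          intro x hx he
          exact hm ((pwm_mem_models t m).mpr (List.mem_map.mpr ⟨x, hx, he⟩))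
        have hnil : pwmPairs t m = [] := pwm_pairs_nil t m hnorec
        rw [pwm_models_append]
        simp only [if_neg hm]
        unfold pwmStepR
        simp only [hc, Bool.false_eq_true, if_false]
        rw [PySem.Dict.getD_eq_get?_getD, PySem.Dict.get?_insert_self]
        simp only [Option.getD_some, List.not_mem_nil, if_false, List.nil_append]
        rw [PySem.Dict.insert_insert_self, PySem.Dict.items_insert, hc]
        simp only [Bool.false_eq_true, if_false]
        rw [ih, List.map_append]
        congr 1
        · apply List.map_congr_left
          intro m' hm'
          rw [pwm_pairs_append, if_neg]
          rintro ⟨h2, -⟩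
          exact hm (show (p, m).2 ∈ pwmModels t by rw [h2]; exact hm')
        · simp [pwm_pairs_append, hnil]

-- B's dict build over nodup fresh keys lists its entries in order
theorem pwm_build_items (ms : List String) (f : String → List (String × String))
    (hnd : ms.Nodup) :
    (ms.foldl (fun d m => d.insert m (f m)) PySem.Dict.empty).items
      = ms.map (fun m => (m, f m)) := by
  have := PySem.Dict.items_foldl_insert_fresh (l := ms) (k := fun m => m)
    (v := f) (d := PySem.Dict.empty)
    (by intro a _; exact PySem.Dict.contains_empty a) (by simpa using hnd)
  simpa using this

-- ===== VERDICT (by name: the statement is the Claim_ definition above) =====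
theorem parse_working_models_spec : Claim_equal_parse_working_models := by
  intro lines _
  unfold Spec_parse_working_models parse_working_models parse_working_models_alt
  rw [pwm_fold_record]
  have hdict : (lines.filterMap pwmRecord).foldl pwmStepR PySem.Dict.empty
      = (pwmModels (lines.filterMap pwmRecord)).foldl
          (fun d m => d.insert m (pwmPairs (lines.filterMap pwmRecord) m)) PySem.Dict.empty := by
    apply PySem.Dict.ext
    rw [pwm_fold_items, pwm_build_items _ _ (pwm_models_nodup _)]
  rw [hdict]
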